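-- pv_equiv track=rewrite | github.com/NMC789/hawaiian-pronounciation | hawaiian_pronounce.py | pronounce
-- ===== SOURCE A (Python) =====
-- consonants = ["h", "w", "p", "k", "l", "m", "n"]
--
-- vowels = {"a":"ah", "e":"eh", "i":"ee", "o":"oh", "u":"oo"}
--
-- doubleVows = {"ai":"eye", "ae":"eye", "ao":"ow", "au":"ow", "ei":"ay", "eu":"eh-oo", "iu":"ew", "oi":"oyo", "ou":"ow", "ui":"ooey"}
--
-- def pronounce(word):
--     """
--     Given a valid hawaiian word,
--     returns a string that gives the correct pronunciation
--     """
--     word = word.lower()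
--     output = ""
--     index = 0
--     while index < len(word):
--         #if letter at index and next letter is a double vowel, handle
--         if word[index:index + 2] in doubleVows:
--             output += doubleVows[word[index:index+2]]
--             index += 2
--
--         #if letter at index is a vowel, handle
--         elif word[index] in vowels:
--             output += vowels[word[index]]
--             index += 1
--
--         #if letter is consonant, handle that
--         elif word[index] in consonants:
--             if word[index] == "w":
--                 if index == 0:
--                     output += "w"
--
--                 elif word[index - 1] == "i" or word[index - 1] == "e":
--                     output += "v"
--
--                 elif word[index - 1] == "u" or word[index - 1] == "o":
--                     output += "w"
--                 index += 1
--             else: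
--                 output += word[index]
--                 index += 1
--
--         #If apostrophe, handle that
--         elif word[index] == "'":
--             output = output.strip("-")
--             output += "'"
--             index += 1
--
--         if index >= len(word) or word[index-1] == "'" or word[index-1] == " " or word[index-1] in consonants:
--             output += ""
--
--         else:
--             output += "-"
--
--     return output.capitalize()
-- ===== SOURCE B (Python) =====
-- consonants = ["h", "w", "p", "k", "l", "m", "n"]
--
-- vowels = {"a":"ah", "e":"eh", "i":"ee", "o":"oh", "u":"oo"}
--
-- doubleVows = {"ai":"eye", "ae":"eye", "ao":"ow", "au":"ow", "ei":"ay", "eu":"eh-oo", "iu":"ew", "oi":"oyo", "ou":"ow", "ui":"ooey"}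
--
--
-- def _tokenize(chars):
--     """Greedy left-to-right scan into (phoneme, kind) tokens, kind in 'v'/'c'/'a'.
--     Stops at the first unrecognized character (A never terminates there)."""
--     tokens = []
--     prev = None
--     while chars:
--         c = chars[0]
--         if len(chars) >= 2 and c + chars[1] in doubleVows:
--             tokens.append((doubleVows[c + chars[1]], 'v'))
--             prev = chars[1]
--             chars = chars[2:]
--         elif c in vowels:
--             tokens.append((vowels[c], 'v'))
--             prev = c
--             chars = chars[1:]
--         elif c in consonants:
--             if c == 'w':
--                 if prev is None:
--                     ph = 'w'
--                 elif prev in ('i', 'e'):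
--                     ph = 'v'
--                 elif prev in ('u', 'o'):
--                     ph = 'w'
--                 else:
--                     ph = ''
--             else:
--                 ph = c
--             tokens.append((ph, 'c'))
--             prev = c
--             chars = chars[1:]
--         elif c == "'":
--             tokens.append(("'", 'a'))
--             prev = c
--             chars = chars[1:]
--         else:
--             break
--     return tokens
--
--
-- def pronounce(word):
--     """
--     Given a valid hawaiian word,
--     returns a string that gives the correct pronunciation
--     """
--     tokens = _tokenize(list(word.lower()))
--     out = ""
--     while tokens:
--         ph, kind = tokens[0]
--         tokens = tokens[1:]
--         if kind == 'a':
--             out = out.strip('-') + "'"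
--         else:
--             out += ph
--             if kind == 'v' and tokens:
--                 out += '-'
--     return out.capitalize()
-- ===== Notes on version B (the rewrite author's own statement) =====
-- stated objective: alternative
-- what changed: Replaces A's single index-driven while loop that interleaves phoneme emission with hyphenation state into two passes: a greedy tokenizer producing (phoneme, kind) tokens that carries the previous raw character explicitly, followed by an assembly pass that hyphenates after non-final vowel tokens.
import Mathlib
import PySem

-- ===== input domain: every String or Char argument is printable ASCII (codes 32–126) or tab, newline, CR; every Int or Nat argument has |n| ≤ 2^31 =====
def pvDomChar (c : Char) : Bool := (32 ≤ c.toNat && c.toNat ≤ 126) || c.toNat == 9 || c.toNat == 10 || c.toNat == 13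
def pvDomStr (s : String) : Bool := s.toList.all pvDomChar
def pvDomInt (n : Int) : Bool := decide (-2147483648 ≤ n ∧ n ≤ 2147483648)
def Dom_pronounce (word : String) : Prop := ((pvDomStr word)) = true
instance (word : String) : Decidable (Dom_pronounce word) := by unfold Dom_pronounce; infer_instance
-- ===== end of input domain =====

-- B replaces A's single stateful index loop by a tokenize-then-assemble two-pass decomposition (alternative, not faster).

-- shared tables (the module-level constants of the Python file) and the port of str.capitalize
def pvConsonants : List Char := ['h', 'w', 'p', 'k', 'l', 'm', 'n']

def pvVowel : Char → Option (List Char)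
  | 'a' => some ['a', 'h']
  | 'e' => some ['e', 'h']
  | 'i' => some ['e', 'e']
  | 'o' => some ['o', 'h']
  | 'u' => some ['o', 'o']
  | _ => none

def pvDoubleVow : Char → Char → Option (List Char)
  | 'a', 'i' => some ['e', 'y', 'e']
  | 'a', 'e' => some ['e', 'y', 'e']
  | 'a', 'o' => some ['o', 'w']
  | 'a', 'u' => some ['o', 'w']
  | 'e', 'i' => some ['a', 'y']
  | 'e', 'u' => some ['e', 'h', '-', 'o', 'o']
  | 'i', 'u' => some ['e', 'w']
  | 'o', 'i' => some ['o', 'y', 'o']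
  | 'o', 'u' => some ['o', 'w']
  | 'u', 'i' => some ['o', 'o', 'e', 'y']
  | _, _ => none

-- hand port of str.capitalize (upper-case first char, lower-case the rest); exact on ASCII, which is all Dom_ admits
def pvCapitalize : List Char → List Char
  | [] => []
  | c :: r => PySem.Chars.upperChar c :: PySem.Chars.lower r

-- ===== PORT A =====
-- A's while loop; fuel = w.length suffices since every recognized character advances index by ≥ 1.
-- On an unrecognized character Python never advances and loops forever; the port returns the
-- accumulated output there (those inputs are excluded by Pre_pronounce).
def pronounceGo (w : List Char) (output : List Char) (index : Nat) (fuel : Nat) : List Char :=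
  match fuel with
  | 0 => output
  | fuel + 1 =>
    if index < w.length then
      let c := w.getD index ' '
      let step : Option (List Char × Nat) :=
        match (match (w.drop index).take 2 with | [a, b] => pvDoubleVow a b | _ => none) with
        | some s => some (output ++ s, index + 2)
        | none =>
          match pvVowel c with
          | some s => some (output ++ s, index + 1)
          | none =>
            if c ∈ pvConsonants then
              if c = 'w' then
                if index = 0 then some (output ++ ['w'], index + 1)
                else if w.getD (index - 1) ' ' = 'i' ∨ w.getD (index - 1) ' ' = 'e' then
                  some (output ++ ['v'], index + 1)
                else if w.getD (index - 1) ' ' = 'u' ∨ w.getD (index - 1) ' ' = 'o' then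
                  some (output ++ ['w'], index + 1)
                else some (output, index + 1)
              else some (output ++ [c], index + 1)
            else if c = '\'' then
              some (PySem.Chars.stripChars output ['-'] ++ ['\''], index + 1)
            else none
      match step with
      | none => output  -- Python diverges here; outside Pre_pronounce
      | some (out1, idx1) =>
        let out2 :=
          if w.length ≤ idx1 ∨ w.getD (idx1 - 1) ' ' = '\'' ∨ w.getD (idx1 - 1) ' ' = ' ' ∨
              w.getD (idx1 - 1) ' ' ∈ pvConsonants then out1
          else out1 ++ ['-']
        pronounceGo w out2 idx1 fuel
    else output

def pronounce (word : String) : String :=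
  String.ofList (pvCapitalize (pronounceGo (PySem.Chars.lower word.toList) [] 0
    (PySem.Chars.lower word.toList).length))

-- ===== PORT B =====
-- single-character token of Source B's tokenizer (vowel / consonant incl. the 'w' rule via prev / apostrophe)
def pvTok1 (c : Char) (prev : Option Char) : Option (List Char × Char) :=
  match pvVowel c with
  | some s => some (s, 'v')
  | none =>
    if c ∈ pvConsonants then
      if c = 'w' then
        match prev with
        | none => some (['w'], 'c')
        | some p =>
          if p = 'i' ∨ p = 'e' then some (['v'], 'c')
          else if p = 'u' ∨ p = 'o' then some (['w'], 'c')
          else some ([], 'c')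
      else some ([c], 'c')
    else if c = '\'' then some (['\''], 'a')
    else none

-- Source B's _tokenize: greedy scan carrying the previous raw character; stops at the first unrecognized char
def pvTokenize : List Char → Option Char → List (List Char × Char)
  | [], _ => []
  | [c], prev =>
    match pvTok1 c prev with
    | some t => [t]
    | none => []
  | c :: b :: rest, prev =>
    match pvDoubleVow c b with
    | some s => (s, 'v') :: pvTokenize rest (some b)
    | none =>
      match pvTok1 c prev with
      | some t => t :: pvTokenize (b :: rest) (some c)
      | none => []

-- Source B's assembly loop: apostrophe strips '-', a vowel token that is not last gets a hyphen
def pvAssemble : List (List Char × Char) → List Char → List Char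
  | [], out => out
  | (ph, kind) :: rest, out =>
    if kind = 'a' then pvAssemble rest (PySem.Chars.stripChars out ['-'] ++ ['\''])
    else
      let out1 := out ++ ph
      pvAssemble rest (if kind = 'v' ∧ rest ≠ [] then out1 ++ ['-'] else out1)

def pronounce_alt (word : String) : String :=
  String.ofList (pvCapitalize (pvAssemble (pvTokenize (PySem.Chars.lower word.toList) none) []))

-- ===== PRECONDITION & SPEC =====
-- Pre_ excludes words containing (after lowercasing) any character other than a Hawaiian vowel,
-- consonant or apostrophe: on those A's while loop never advances and Python diverges.
def Pre_pronounce (word : String) : Prop :=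
  ((PySem.Chars.lower word.toList).all
    (fun c => c ∈ (['a', 'e', 'i', 'o', 'u', 'h', 'w', 'p', 'k', 'l', 'm', 'n', '\''] : List Char))) = true
instance (word : String) : Decidable (Pre_pronounce word) := by unfold Pre_pronounce; infer_instance

def pvWitness_pronounce : String := "Hawai'i"

def Spec_pronounce (word : String) (out : String) : Prop := out = pronounce_alt word
instance (word : String) (out : String) : Decidable (Spec_pronounce word out) := by unfold Spec_pronounce; infer_instance

-- ===== CLAIM (what is proved, stated in full; the proofs are below) =====
def Claim_equal_pronounce : Prop := ∀ (word : String), Dom_pronounce word → Pre_pronounce word → Spec_pronounce word (pronounce word)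

-- ===== LEMMAS AND PROOFS =====

def pvRec (c : Char) : Prop :=
  c ∈ (['a', 'e', 'i', 'o', 'u', 'h', 'w', 'p', 'k', 'l', 'm', 'n', '\''] : List Char)

def pvPrevOf (w : List Char) (i : Nat) : Option Char :=
  if i = 0 then none else some (w.getD (i - 1) ' ')

lemma pvDoubleVow_snd {a b : Char} {s : List Char} (h : pvDoubleVow a b = some s) :
    b = 'i' ∨ b = 'e' ∨ b = 'o' ∨ b = 'u' := by
  unfold pvDoubleVow at h
  split at h <;> simp_all

lemma pvVowel_char {c : Char} {s : List Char} (h : pvVowel c = some s) :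
    c = 'a' ∨ c = 'e' ∨ c = 'i' ∨ c = 'o' ∨ c = 'u' := by
  unfold pvVowel at h
  split at h <;> simp_all

lemma pvTok1_isSome {c : Char} (hc : pvRec c) (prev : Option Char) :
    (pvTok1 c prev).isSome := by
  unfold pvRec at hc
  fin_cases hc <;> cases prev <;>
    simp [pvTok1, pvVowel, pvConsonants] <;> split_ifs <;> simp

lemma pvTokenize_ne_nil {c : Char} (hc : pvRec c) (l : List Char) (prev : Option Char) :
    pvTokenize (c :: l) prev ≠ [] := by
  have hs := pvTok1_isSome hc prev
  obtain ⟨t, ht⟩ := Option.isSome_iff_exists.mp hs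
  cases l with
  | nil => simp [pvTokenize, ht]
  | cons b rest =>
    unfold pvTokenize
    cases h : pvDoubleVow c b <;> simp [h, ht]

lemma pvTokenize_eq_nil_iff (t : List Char) (prev : Option Char) (h : ∀ d ∈ t, pvRec d) :
    pvTokenize t prev = [] ↔ t = [] := by
  cases t with
  | nil => simp [pvTokenize]
  | cons d t2 =>
    simp only [List.cons_ne_nil, iff_false]
    exact pvTokenize_ne_nil (h d List.mem_cons_self) t2 prev

lemma pv_main (w : List Char) (hw : ∀ c ∈ w, pvRec c) :
    ∀ fuel index output, index ≤ w.length → w.length ≤ index + fuel →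
      pronounceGo w output index fuel =
        pvAssemble (pvTokenize (w.drop index) (pvPrevOf w index)) output := by
  intro fuel
  induction fuel with
  | zero =>
    intro index output hle hge
    have : index = w.length := le_antisymm hle (by omega)
    subst this
    simp [pronounceGo, pvTokenize, pvAssemble, List.drop_length]
  | succ fuel ih =>
    intro index output hle hge
    by_cases hidx : index < w.length
    · have hcg : w.getD index ' ' = w[index] := List.getD_eq_getElem w ' ' hidx
      have hdrop : w.drop index = w.getD index ' ' :: w.drop (index + 1) := by
        rw [hcg]; exact (List.getElem_cons_drop ..).symm
      have hrec : pvRec (w.getD index ' ') := by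
        rw [hcg]; exact hw _ (List.getElem_mem hidx)
      have hwrest : ∀ d ∈ w.drop (index + 1), pvRec d :=
        fun d hd => hw d (List.mem_of_mem_drop hd)
      have hnil1 : w.drop (index + 1) = [] ↔ w.length ≤ index + 1 := List.drop_eq_nil_iff
      have hprev1 : pvPrevOf w (index + 1) = some (w.getD index ' ') := by
        simp [pvPrevOf]
      simp only [pronounceGo, if_pos hidx]
      cases hdvr : (match (w.drop index).take 2 with | [a, b] => pvDoubleVow a b | _ => none) with
      | some s =>
        cases ht : w.drop (index + 1) with
        | nil => rw [hdrop, ht] at hdvr; simp at hdvr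
        | cons b t2 =>
          have hdv : pvDoubleVow (w.getD index ' ') b = some s := by
            rw [hdrop, ht] at hdvr; simpa using hdvr
          have hb : w.getD (index + 1) ' ' = b := by
            have h0 : w[index + 1]? = some b := by
              have h1 := List.getElem?_drop (xs := w) (i := index + 1) (j := 0)
              rw [ht] at h1; simpa using h1.symm
            simp [List.getD_eq_getElem?_getD, h0]
          have hidx1 : index + 1 < w.length := by
            rcases Nat.lt_or_ge (index + 1) w.length with h | h
            · exact h
            · rw [hnil1.mpr h] at ht; exact absurd ht (by simp)
          have ht2 : w.drop (index + 2) = t2 := by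
            have h2 : w.drop (index + 1 + 1) = (w.drop (index + 1)).tail :=
              List.drop_add_one_eq_tail_drop
            rw [ht] at h2; simpa using h2
          have hnil2 : w.drop (index + 2) = [] ↔ w.length ≤ index + 2 := List.drop_eq_nil_iff
          have hbspec : ¬ (b = '\'' ∨ b = ' ' ∨ b ∈ pvConsonants) := by
            rcases pvDoubleVow_snd hdv with h | h | h | h <;> subst h <;> decide
          push_neg at hbspec
          have hsub2 : index + 2 - 1 = index + 1 := by omega
          have hprev2 : pvPrevOf w (index + 2) = some b := by
            unfold pvPrevOf
            rw [if_neg (by omega), hsub2, hb]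
          have hrest : pvTokenize t2 (some b) = [] ↔ t2 = [] :=
            pvTokenize_eq_nil_iff t2 (some b)
              (fun d hd => hw d (List.mem_of_mem_drop (i := index + 2) (l := w) (by rw [ht2]; exact hd)))
          have hih2 : ∀ out, pronounceGo w out (index + 2) fuel =
              pvAssemble (pvTokenize t2 (some b)) out := by
            intro out
            rw [ih (index + 2) out (by omega) (by omega), ht2, hprev2]
          rw [hdrop, ht]
          simp only [pvTokenize, hdv]
          by_cases h2 : t2 = []
          · have hcond : w.length ≤ index + 2 := hnil2.mp (by rw [ht2, h2])
            simp [pvAssemble, pvTokenize, hih2, hrest.mpr h2, hcond, h2, hsub2, -List.getD_eq_getElem?_getD]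
          · have hcond : ¬ w.length ≤ index + 2 := fun h => h2 (ht2.symm.trans (hnil2.mpr h))
            have hr : pvTokenize t2 (some b) ≠ [] := fun h => h2 (hrest.mp h)
            simp [pvAssemble, hih2, hr, hcond, hb, hbspec.1, hbspec.2.1, hbspec.2.2,
              hsub2, -List.getD_eq_getElem?_getD]
      | none =>
        have htok : ∀ prev, pvTokenize (w.drop index) prev =
            (match pvTok1 (w.getD index ' ') prev with
             | some tk => tk :: pvTokenize (w.drop (index + 1)) (some (w.getD index ' '))
             | none => []) := by
          intro prev
          rw [hdrop]
          cases ht : w.drop (index + 1) with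
          | nil =>
            cases h1 : pvTok1 (w.getD index ' ') prev <;>
              simp only [pvTokenize, h1]
          | cons b t2 =>
            have hdvn : pvDoubleVow (w.getD index ' ') b = none := by
              rw [hdrop, ht] at hdvr; simpa using hdvr
            cases h1 : pvTok1 (w.getD index ' ') prev <;>
              simp only [pvTokenize, hdvn, h1]
        have hrest : pvTokenize (w.drop (index + 1)) (some (w.getD index ' ')) = [] ↔
            w.drop (index + 1) = [] :=
          pvTokenize_eq_nil_iff _ _ hwrest
        have hih2 : ∀ out, pronounceGo w out (index + 1) fuel =
            pvAssemble (pvTokenize (w.drop (index + 1)) (some (w.getD index ' '))) out := by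
          intro out
          rw [ih (index + 1) out (by omega) (by omega), hprev1]
        have hsub1 : index + 1 - 1 = index := by omega
        rw [htok]
        cases hv : pvVowel (w.getD index ' ') with
        | some vs =>
          have hns : ¬ (w.getD index ' ' = '\'' ∨ w.getD index ' ' = ' ' ∨
              w.getD index ' ' ∈ pvConsonants) := by
            rcases pvVowel_char hv with h | h | h | h | h <;> rw [h] <;> decide
          push_neg at hns
          by_cases h1 : w.drop (index + 1) = []
          · have hcond : w.length ≤ index + 1 := hnil1.mp h1
            simp [pvTok1, hv, pvAssemble, hih2, hrest.mpr h1, hcond, hsub1, -List.getD_eq_getElem?_getD]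
          · have hcond : ¬ w.length ≤ index + 1 := fun h => h1 (hnil1.mpr h)
            have hr : pvTokenize (w.drop (index + 1)) (some (w.getD index ' ')) ≠ [] :=
              fun h => h1 (hrest.mp h)
            simp [pvTok1, hv, pvAssemble, hih2, hr, hcond, hns.1, hns.2.1, hns.2.2,
              hsub1, -List.getD_eq_getElem?_getD]
        | none =>
          by_cases hcons : w.getD index ' ' ∈ pvConsonants
          · by_cases hwch : w.getD index ' ' = 'w'
            · by_cases h0 : index = 0
              · subst h0
                simp [pvTok1, hv, hcons, hwch, pvPrevOf, pvAssemble, hih2, pvConsonants,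
                  show pvVowel 'w' = none from rfl, -List.getD_eq_getElem?_getD]
              · simp only [pvTok1, hv, hcons, hwch, if_pos, if_true, if_neg h0, pvPrevOf,
                  hsub1]
                split_ifs <;>
                  simp_all [pvAssemble, hih2, hsub1, -List.getD_eq_getElem?_getD]
            · simp [pvTok1, hv, hcons, hwch, pvAssemble, hih2, hsub1, -List.getD_eq_getElem?_getD]
          · have hap : w.getD index ' ' = '\'' := by
              have hr := hrec
              unfold pvRec at hr
              simp only [List.mem_cons, List.not_mem_nil, or_false] at hr
              rcases hr with h | h | h | h | h | h | h | h | h | h | h | h | h <;>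
                first
                | exact h
                | (rw [h] at hv; exact absurd hv (by decide))
                | exact absurd (by rw [h]; decide) hcons
            simp [pvTok1, hv, hcons, hap, pvAssemble, hih2, hsub1,
              show pvVowel '\'' = none from rfl, (by decide : ¬('\'' ∈ pvConsonants)),
              -List.getD_eq_getElem?_getD]
    · have : index = w.length := le_antisymm hle (by omega)
      subst this
      simp [pronounceGo, pvTokenize, pvAssemble, List.drop_length]

-- ===== VERDICT (by name: the statement is the Claim_ definition above) =====
theorem pronounce_spec : Claim_equal_pronounce := by
  intro word _hdom hpre
  unfold Spec_pronounce pronounce pronounce_alt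
  have h := pv_main (PySem.Chars.lower word.toList)
    (fun c hc => by
      have h1 := List.all_eq_true.mp hpre c hc
      simpa [pvRec] using h1)
    (PySem.Chars.lower word.toList).length 0 [] (Nat.zero_le _) (by omega)
  simp only [List.drop_zero] at h
  rw [h]
  rfl
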